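-- pv_equiv track=rewrite | github.com/hainguyen0207/ThuatToanAnToanThongTin | Exercise19.py | expression_prime
-- ===== SOURCE A (Python) =====
-- def find_prime_number(l):
--     num = {x: 1 for x in range(2, l + 1)}
--     p = 2
--     while p <= l:
--         for i in range(p, l + 1):
--             if p * i <= l and p * i in num:
--                 del num[p * i]
--         p += 1
--     return list(num)
--
-- def expression_prime(number_a, number_b,
--                      number_c, m, l):
--     result = []
--     for x in range(m, l + 1):
--         value = number_a * x * x + number_b * x \
--                 + number_c
--         if value in find_prime_number(value):
--             result.append(x)
--     return result
-- ===== SOURCE B (Python) =====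
-- def expression_prime(number_a, number_b, number_c, m, l):
--     pairs = [(x, number_a * x * x + number_b * x + number_c) for x in range(m, l + 1)]
--     if not pairs:
--         return []
--     top = max(v for _, v in pairs)
--     is_comp = set()
--     p = 2
--     while p * p <= top:
--         for i in range(p, top // p + 1):
--             is_comp.add(p * i)
--         p += 1
--     primes = {v for v in range(2, top + 1) if v not in is_comp}
--     return [x for x, v in pairs if v in primes]
-- ===== Notes on version B (the rewrite author's own statement) =====
-- stated objective: alternative
-- what changed: A rebuilds a full sieve dictionary up to value(x) and scans its key list for every x; B computes all (x, value) pairs first, builds one composite-marking sieve set up to the maximum value (marking p*i for p*p <= max), and then filters the pairs in a single pass.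
import Mathlib
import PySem

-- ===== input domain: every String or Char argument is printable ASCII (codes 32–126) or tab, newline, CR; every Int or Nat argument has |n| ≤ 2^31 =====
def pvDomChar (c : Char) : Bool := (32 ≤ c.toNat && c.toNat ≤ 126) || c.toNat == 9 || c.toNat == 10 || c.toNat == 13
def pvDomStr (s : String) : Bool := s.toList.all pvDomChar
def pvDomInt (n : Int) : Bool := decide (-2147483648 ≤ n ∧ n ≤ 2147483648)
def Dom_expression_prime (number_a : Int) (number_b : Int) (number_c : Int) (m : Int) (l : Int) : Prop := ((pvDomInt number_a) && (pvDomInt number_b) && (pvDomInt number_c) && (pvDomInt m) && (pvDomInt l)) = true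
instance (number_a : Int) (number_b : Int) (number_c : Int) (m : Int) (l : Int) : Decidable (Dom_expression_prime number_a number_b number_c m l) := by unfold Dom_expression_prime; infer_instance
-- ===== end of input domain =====

-- B replaces A's per-x rebuild of a sieve dictionary (and scan of its key list) by ONE composite
-- sieve up to the maximum value followed by a single filtering pass; objective: alternative.

-- ===== PORT A =====
-- inner loop: 'for i in range(p, l+1): if p*i <= l and p*i in num: del num[p*i]'
def pvSieveInner (l p : Int) (num : PySem.Dict Int Int) : PySem.Dict Int Int :=
  (PySem.List.pyRange p (l + 1) 1).foldl
    (fun num i => if p * i ≤ l ∧ num.contains (p * i) = true then num.erase (p * i) else num) num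

-- 'p = 2; while p <= l: <inner>; p += 1'
def pvSieveWhile (l p : Int) (num : PySem.Dict Int Int) : PySem.Dict Int Int :=
  if _h : p ≤ l then pvSieveWhile l (p + 1) (pvSieveInner l p num) else num
termination_by (l + 1 - p).toNat
decreasing_by omega

def find_prime_number (l : Int) : List Int :=
  let num := (PySem.List.pyRange 2 (l + 1) 1).foldl (fun d x => d.insert x 1) PySem.Dict.empty
  (pvSieveWhile l 2 num).keys

def expression_prime (number_a : Int) (number_b : Int) (number_c : Int) (m : Int) (l : Int) : List Int :=
  (PySem.List.pyRange m (l + 1) 1).foldl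
    (fun result x =>
      let value := number_a * x * x + number_b * x + number_c
      if value ∈ find_prime_number value then result ++ [x] else result) []

-- ===== PORT B =====
-- 'for i in range(p, top//p + 1): is_comp.add(p*i)'
def pvMarkMultiples (top p : Int) (s : PySem.Set Int) : PySem.Set Int :=
  (PySem.List.pyRange p (PySem.Int.floordiv top p + 1) 1).foldl (fun s i => PySem.Set.add s (p * i)) s

-- 'p = 2; while p*p <= top: <mark>; p += 1'
def pvMarkLoop (top p : Int) (s : PySem.Set Int) : PySem.Set Int :=
  if _h : p * p ≤ top then pvMarkLoop top (p + 1) (pvMarkMultiples top p s) else s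
termination_by (top + 1 - p).toNat
decreasing_by
  have : p ≤ p * p := by nlinarith [sq_nonneg (p - 1)]
  omega

def expression_prime_alt (number_a : Int) (number_b : Int) (number_c : Int) (m : Int) (l : Int) : List Int :=
  let pairs := (PySem.List.pyRange m (l + 1) 1).map
    (fun x => (x, number_a * x * x + number_b * x + number_c))
  match PySem.List.max? (pairs.map (·.2)) (fun v => v) with
  | none => []
  | some top =>
    let isComp := pvMarkLoop top 2 PySem.Set.empty
    let primes := PySem.Set.ofList
      ((PySem.List.pyRange 2 (top + 1) 1).filter (fun v => decide (¬ v ∈ isComp)))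
    pairs.filterMap (fun xv => if xv.2 ∈ primes then some xv.1 else none)

-- ===== PRECONDITION & SPEC =====
def Spec_expression_prime (number_a : Int) (number_b : Int) (number_c : Int) (m : Int) (l : Int) (out : List Int) : Prop := out = expression_prime_alt number_a number_b number_c m l
instance (number_a : Int) (number_b : Int) (number_c : Int) (m : Int) (l : Int) (out : List Int) : Decidable (Spec_expression_prime number_a number_b number_c m l out) := by unfold Spec_expression_prime; infer_instance

-- ===== CLAIM (what is proved, stated in full; the proofs are below) =====
def Claim_equal_expression_prime : Prop := ∀ (number_a : Int) (number_b : Int) (number_c : Int) (m : Int) (l : Int), Dom_expression_prime number_a number_b number_c m l → Spec_expression_prime number_a number_b number_c m l (expression_prime number_a number_b number_c m l)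

-- ===== LEMMAS AND PROOFS =====

-- 'v = p*i for some 2 ≤ p ≤ i' — v is composite-shaped; both sieves strike out exactly these
def pvHasFac (v : Int) : Prop := ∃ p i : Int, 2 ≤ p ∧ p ≤ i ∧ p * i = v

theorem pvGetErase (d : PySem.Dict Int Int) (k k' : Int) :
    ((d.erase k).get? k').isSome = ((d.get? k').isSome && !(k' == k)) := by
  simp only [PySem.Dict.erase, PySem.Dict.get?]
  induction d.items with
  | nil => simp
  | cons h t ih => by_cases h1 : h.1 = k' <;> by_cases h2 : h.1 = k <;> simp_all

theorem pvInnerMem (l p : Int) (is : List Int) (d : PySem.Dict Int Int) (k : Int) :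
    (((is.foldl (fun num i => if p * i ≤ l ∧ num.contains (p * i) = true then num.erase (p * i) else num) d).get? k).isSome = true)
      ↔ ((d.get? k).isSome = true ∧ ∀ i ∈ is, ¬(p * i ≤ l ∧ p * i = k)) := by
  induction is generalizing d with
  | nil => simp
  | cons i t ih =>
    simp only [List.foldl_cons, ih, List.forall_mem_cons]
    have hc := PySem.Dict.contains_eq_isSome_get? (d := d) (k := p * i)
    by_cases hle : p * i ≤ l <;> by_cases hcc : d.contains (p * i) = true <;>
      by_cases hk : p * i = k <;>
      simp_all [pvGetErase] <;> first | tauto | (rw [if_neg (by omega)]; tauto)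

theorem pvWhileMem (l p : Int) (d : PySem.Dict Int Int) (k : Int) :
    (((pvSieveWhile l p d).get? k).isSome = true)
      ↔ ((d.get? k).isSome = true ∧ ∀ q i : Int, p ≤ q → q ≤ l → q ≤ i → i ≤ l → ¬(q * i ≤ l ∧ q * i = k)) := by
  induction p, d using pvSieveWhile.induct (l := l) with
  | case1 p d h ih =>
    rw [pvSieveWhile, dif_pos h, ih]
    rw [pvSieveInner, pvInnerMem]
    constructor
    · rintro ⟨⟨hs, hinner⟩, hrest⟩
      refine ⟨hs, fun q i hpq hql hqi hil => ?_⟩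
      rcases eq_or_lt_of_le hpq with rfl | hlt
      · exact hinner i (by rw [PySem.List.mem_pyRange_one]; omega)
      · exact hrest q i (by omega) hql hqi hil
    · rintro ⟨hs, hall⟩
      refine ⟨⟨hs, fun i hi => ?_⟩, fun q i hpq hql hqi hil => hall q i (by omega) hql hqi hil⟩
      rw [PySem.List.mem_pyRange_one] at hi
      exact hall p i le_rfl h hi.1 (by omega)
  | case2 p d h =>
    rw [pvSieveWhile, dif_neg h]
    constructor
    · intro hs
      exact ⟨hs, fun q i hpq hql hqi hil => by omega⟩
    · rintro ⟨hs, _⟩; exact hs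

theorem pvInitMem (l k : Int) :
    (((PySem.List.pyRange 2 (l + 1) 1).foldl (fun d x => d.insert x (1:Int)) PySem.Dict.empty).get? k).isSome = true
      ↔ (2 ≤ k ∧ k ≤ l) := by
  have hkeys := PySem.Dict.keys_foldl_insert (l := PySem.List.pyRange 2 (l + 1) 1)
    (f := fun (_ : PySem.Dict Int Int) (_ : Int) => (1:Int)) (d := PySem.Dict.empty)
  rw [← Option.ne_none_iff_isSome, ne_eq, PySem.Dict.get?_eq_none_iff_not_mem_keys, not_not, hkeys]
  simp [PySem.Set.mem_update, PySem.Dict.keys_empty, PySem.List.mem_pyRange_one]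

theorem pvMemA (v : Int) : v ∈ find_prime_number v ↔ (2 ≤ v ∧ ¬ pvHasFac v) := by
  unfold find_prime_number
  have hmem : v ∈ (pvSieveWhile v 2 ((PySem.List.pyRange 2 (v + 1) 1).foldl (fun d x => d.insert x (1:Int)) PySem.Dict.empty)).keys
      ↔ ((pvSieveWhile v 2 ((PySem.List.pyRange 2 (v + 1) 1).foldl (fun d x => d.insert x (1:Int)) PySem.Dict.empty)).get? v).isSome = true := by
    rw [← Option.ne_none_iff_isSome, ne_eq, PySem.Dict.get?_eq_none_iff_not_mem_keys, not_not]
  simp only [hmem, pvWhileMem, pvInitMem]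
  constructor
  · rintro ⟨⟨h2, _⟩, hall⟩
    refine ⟨h2, ?_⟩
    rintro ⟨p, i, hp, hpi, heq⟩
    exact hall p i hp (by nlinarith) hpi (by nlinarith) ⟨by omega, heq⟩
  · rintro ⟨h2, hnf⟩
    exact ⟨⟨h2, le_refl v⟩, fun q i hq _ hqi _ h => hnf ⟨q, i, hq, hqi, h.2⟩⟩

theorem pvMarkLoopMem (top p : Int) (hp : 0 ≤ p) (s : PySem.Set Int) (k : Int) :
    k ∈ pvMarkLoop top p s ↔ k ∈ s ∨ ∃ q i : Int, p ≤ q ∧ q * q ≤ top ∧ q ≤ i ∧ i ≤ PySem.Int.floordiv top q ∧ q * i = k := by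
  induction p, s using pvMarkLoop.induct (top := top) with
  | case1 p s h ih =>
    rw [pvMarkLoop, dif_pos h, ih (by omega)]
    rw [pvMarkMultiples, PySem.Set.mem_foldl_add]
    constructor
    · rintro (⟨hk | ⟨i, hi, rfl⟩⟩ | ⟨q, i, hpq, hqq, hqi, hif, rfl⟩)
      · exact Or.inl hk
      · rw [PySem.List.mem_pyRange_one] at hi
        exact Or.inr ⟨p, i, le_rfl, h, hi.1, by omega, rfl⟩
      · exact Or.inr ⟨q, i, by omega, hqq, hqi, hif, rfl⟩
    · rintro (hk | ⟨q, i, hpq, hqq, hqi, hif, rfl⟩)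
      · exact Or.inl (Or.inl hk)
      · rcases eq_or_lt_of_le hpq with rfl | hlt
        · exact Or.inl (Or.inr ⟨i, by rw [PySem.List.mem_pyRange_one]; omega, rfl⟩)
        · exact Or.inr ⟨q, i, by omega, hqq, hqi, hif, rfl⟩
  | case2 p s h =>
    rw [pvMarkLoop, dif_neg h]
    constructor
    · exact Or.inl
    · rintro (hk | ⟨q, i, hpq, hqq, _, _, rfl⟩)
      · exact hk
      · exfalso; nlinarith

theorem pvMemB (top v : Int) (hv : v ≤ top) :
    (v ∈ (PySem.List.pyRange 2 (top + 1) 1).filter (fun v => decide (¬ v ∈ pvMarkLoop top 2 PySem.Set.empty)))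
      ↔ (2 ≤ v ∧ ¬ pvHasFac v) := by
  rw [List.mem_filter, PySem.List.mem_pyRange_one]
  simp only [decide_eq_true_eq, pvMarkLoopMem top 2 (by omega), PySem.Set.empty]
  constructor
  · rintro ⟨⟨h2, _⟩, hn⟩
    refine ⟨h2, ?_⟩
    rintro ⟨q, i, hq, hqi, heq⟩
    refine hn (Or.inr ⟨q, i, hq, by nlinarith, hqi, ?_, heq⟩)
    rw [PySem.Int.le_floordiv_iff_mul_le (by omega)]
    nlinarith
  · rintro ⟨h2, hnf⟩
    refine ⟨⟨h2, by omega⟩, ?_⟩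
    rintro (h | ⟨q, i, hq, hqq, hqi, hif, heq⟩)
    · simp at h
    · exact hnf ⟨q, i, hq, hqi, heq⟩

theorem pvFoldFilter {α : Type} (P : α → Prop) [DecidablePred P] (xs : List α) (acc : List α) :
    xs.foldl (fun r x => if P x then r ++ [x] else r) acc = acc ++ xs.filter (fun x => decide (P x)) := by
  induction xs generalizing acc with
  | nil => simp
  | cons h t ih => by_cases hp : P h <;> simp [hp, ih]

theorem pvFilterMapIf {α : Type} (P : α → Prop) [DecidablePred P] (xs : List α) :
    xs.filterMap (fun x => if P x then some x else none) = xs.filter (fun x => decide (P x)) := by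
  induction xs with
  | nil => rfl
  | cons h t ih => by_cases hp : P h <;> simp [hp, ih]

-- ===== VERDICT (by name: the statement is the Claim_ definition above) =====
theorem expression_prime_spec : Claim_equal_expression_prime := by
  unfold Claim_equal_expression_prime Spec_expression_prime
  intro a b c m l _
  unfold expression_prime expression_prime_alt
  simp only []
  rw [pvFoldFilter (P := fun x => (a * x * x + b * x + c) ∈ find_prime_number (a * x * x + b * x + c))]
  rw [List.nil_append]
  rcases hr : PySem.List.max? (((PySem.List.pyRange m (l + 1) 1).map (fun x => (x, a * x * x + b * x + c))).map (·.2)) (fun v => v) with _ | top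
  · rw [PySem.List.max?_eq_none_iff] at hr
    simp only [List.map_eq_nil_iff] at hr
    rw [hr]
    rfl
  · have htop := PySem.List.max?_isMax hr
    rw [hr]
    dsimp only
    rw [List.filterMap_map]
    simp only [Function.comp_def]
    rw [pvFilterMapIf (P := fun x => (a * x * x + b * x + c) ∈ PySem.Set.ofList
      ((PySem.List.pyRange 2 (top + 1) 1).filter (fun v => decide (¬ v ∈ pvMarkLoop top 2 PySem.Set.empty))))]
    apply List.filter_congr
    intro x hx
    have hvx : (a * x * x + b * x + c) ≤ top := by
      apply htop
      simp only [List.map_map, List.mem_map]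
      exact ⟨x, hx, rfl⟩
    simp only [decide_eq_decide]
    rw [pvMemA, PySem.Set.mem_ofList, pvMemB _ _ hvx]
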